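/- GENERATED by c/gen_decode.py: decode facts of the image, one per distinct instruction byte string. -/
import UserX.DecodeImage

#decode_all Vorbis.Dec
  "0f5705b46f0100"  -- xorps xmm0,XMMWORD PTR [rip+0x16fb4]
  "0f8494010000"  -- je 1083dd
  "0f8554ffffff"  -- jne 1082c5
  "0f8d44010000"  -- jge 10f8f8
  "0faf742470"  -- imul esi,DWORD PTR [rsp+0x70]
  "0fbe8340061200"  -- movsx eax,BYTE PTR [rbx+0x120640]
  "3c40"  -- cmp al,0x40
  "410fb6c5"  -- movzx eax,r13b
  "4180fd20"  -- cmp r13b,0x20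
  "418997e8060000"  -- mov DWORD PTR [r15+0x6e8],edx
  "418d442401"  -- lea eax,[r12+0x1]
  "41d3ed"  -- shr r13d,cl
  "440fb6f1"  -- movzx r14d,cl
  "443bbda0000000"  -- cmp r15d,DWORD PTR [rbp+0xa0]
  "4489a3cc050000"  -- mov DWORD PTR [rbx+0x5cc],r12d
  "448b64242c"  -- mov r12d,DWORD PTR [rsp+0x2c]
  "448bbd68ffffff"  -- mov r15d,DWORD PTR [rbp-0x98]
  "45882f"  -- mov BYTE PTR [r15],r13b
  "458b7c24e4"  -- mov r15d,DWORD PTR [r12-0x1c]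
  "4809f2"  -- or rdx,rsi
  "4863db"  -- movsxd rbx,ebx
  "4883c478"  -- add rsp,0x78
  "48895588"  -- mov QWORD PTR [rbp-0x78],rdx
  "488b1b"  -- mov rbx,QWORD PTR [rbx]
  "488b8518ffffff"  -- mov rax,QWORD PTR [rbp-0xe8]
  "488d486c"  -- lea rcx,[rax+0x6c]
  "488d7bfc"  -- lea rdi,[rbx-0x4]
  "488dbb08070000"  -- lea rdi,[rbx+0x708]
  "488dbceba8050000"  -- lea rdi,[rbx+rbp*8+0x5a8]
  "48c1f802"  -- sar rax,0x2
  "49035e10"  -- add rbx,QWORD PTR [r14+0x10]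
  "4983ec10"  -- sub r12,0x10
  "498d3c04"  -- lea rdi,[r12+rax*1]
  "498d7f18"  -- lea rdi,[r15+0x18]
  "4a837ce50800"  -- cmp QWORD PTR [rbp+r12*8+0x8],0x0
  "4b8dbc3741040000"  -- lea rdi,[r15+r14*1+0x441]
  "4c896318"  -- mov QWORD PTR [rbx+0x18],r12
  "4c8b6598"  -- mov r12,QWORD PTR [rbp-0x68]
  "4c8d442450"  -- lea r8,[rsp+0x50]
  "4d63fe"  -- movsxd r15,r14d
  "4e8b6cf308"  -- mov r13,QWORD PTR [rbx+r14*8+0x8]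
  "660f6ef5"  -- movd xmm6,ebp
  "6642837c650400"  -- cmp WORD PTR [rbp+r12*2+0x4],0x0
  "7305"  -- jae 10b4b1
  "7465"  -- je 1092eb
  "7588"  -- jne 10d47e
  "7cc0"  -- jl 114032
  "7f02"  -- jg 1158ea
  "81e755555555"  -- and edi,0x55555555
  "83e5f8"  -- and ebp,0xfffffff8
  "8945a0"  -- mov DWORD PTR [rbp-0x60],eax
  "899d98000000"  -- mov DWORD PTR [rbp+0x98],ebx
  "8b44243c"  -- mov eax,DWORD PTR [rsp+0x3c]
  "8b7dbc"  -- mov edi,DWORD PTR [rbp-0x44]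
  "8d442d00"  -- lea eax,[rbp+rbp*1+0x0]
  "be14000000"  -- mov esi,0x14
  "c7431800000000"  -- mov DWORD PTR [rbx+0x18],0x0
  "c783e806000000000000"  -- mov DWORD PTR [rbx+0x6e8],0x0
  "e8059cffff"  -- call 100640
  "e80effffff"  -- call 10d040
  "e818fdffff"  -- call 107500
  "e822b6ffff"  -- call 100640
  "e82bd9feff"  -- call 100720
  "e835f3feff"  -- call 100300
  "e84074ffff"  -- call 103d00
  "e84a12ffff"  -- call 100800
  "e855e2feff"  -- call 103d00
  "e862f3feff"  -- call 103d00
  "e86e9fffff"  -- call 100640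
  "e879c2ffff"  -- call 100800
  "e88513ffff"  -- call 100800
  "e88f89ffff"  -- call 1009c0
  "e89919ffff"  -- call 100800
  "e8a3a5feff"  -- call 100800
  "e8ae75ffff"  -- call 100720
  "e8b7b5ffff"  -- call 100640
  "e8c1c1feff"  -- call 100300
  "e8cb6bfeff"  -- call 100720
  "e8d5d4feff"  -- call 100720
  "e8e031ffff"  -- call 108f20
  "e8e9a0feff"  -- call 100800
  "e8f18fffff"  -- call 100800
  "e8fc94ffff"  -- call 100720
  "e930030000"  -- jmp 110fc2
  "e976ffffff"  -- jmp 10e871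
  "e9cfd4ffff"  -- jmp 113b22
  "eb2e"  -- jmp 104936
  "ebbd"  -- jmp 10ead6
  "f20f102424"  -- movsd xmm4,QWORD PTR [rsp]
  "f20f59c3"  -- mulsd xmm0,xmm3
  "f30f102b"  -- movss xmm5,DWORD PTR [rbx]
  "f30f1064240c"  -- movss xmm4,DWORD PTR [rsp+0xc]
  "f30f1143f0"  -- movss DWORD PTR [rbx-0x10],xmm0
  "f30f11642418"  -- movss DWORD PTR [rsp+0x18],xmm4
  "f30f58442438"  -- addss xmm0,DWORD PTR [rsp+0x38]
  "f30f595d60"  -- mulss xmm3,DWORD PTR [rbp+0x60]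
  "f30f5cdc"  -- subss xmm3,xmm4
  "f3410f114424f4"  -- movss DWORD PTR [r12-0xc],xmm0
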